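-- pv_equiv track=rewrite | github.com/SimeonChifligarov/Alpha_Judge_Softuni | Python_Advanced/Python_Advanced/02_01_Tuples_and_Sets_Lab/05_SoftUni_Party_v3.py | find_absent_guests
-- ===== SOURCE A (Python) =====
-- def find_absent_guests(invited_guests: set[str], incoming_guests: str) -> tuple[list[str], list[str]]:
--     """
--     Find all guests who did not come to the party.
--
--     Args:
--         invited_guests (set[str]): Set with all invited guests.
--         incoming_guests (str): Single string with all incoming guest entries separated by newline.
--
--     Returns:
--         tuple[list[str], list[str]]: Sorted lists of VIP and Regular missing guests.
--     """
--     arrivals = incoming_guests.split('\n')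
--     for guest in arrivals:
--         if guest != 'END':
--             invited_guests.discard(guest)
--     vip_missing = sorted(guest for guest in invited_guests if guest[0].isdigit())
--     regular_missing = sorted(guest for guest in invited_guests if not guest[0].isdigit())
--     return vip_missing, regular_missing
-- ===== SOURCE B (Python) =====
-- def _insert_sorted(lst, guest):
--     """Insert guest into the sorted list lst, keeping it sorted (online insertion sort)."""
--     i = 0
--     while i < len(lst) and lst[i] < guest:
--         i += 1
--     lst.insert(i, guest)
--
--
-- def find_absent_guests(invited_guests: set, incoming_guests: str):
--     invited_guests.difference_update(
--         line for line in incoming_guests.split('\n') if line != 'END')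
--     vip_missing, regular_missing = [], []
--     for guest in invited_guests:
--         _insert_sorted(vip_missing if guest[0].isdigit() else regular_missing, guest)
--     return vip_missing, regular_missing
-- ===== Notes on version B (the rewrite author's own statement) =====
-- stated objective: alternative
-- what changed: B never calls sorted(): it removes all non-END arrival lines from the set in one difference_update, then builds the VIP and regular lists by an online hand-written insertion sort (each remaining guest is inserted at its sorted position in the appropriate list in a single pass over the set), instead of A's per-guest discard loop followed by two separately filtered library sorts.
-- outside the precondition, e.g. on find_absent_guests({'', 'Ann'}, 'END'): A raises IndexError, B raises IndexError
import Mathlib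
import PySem

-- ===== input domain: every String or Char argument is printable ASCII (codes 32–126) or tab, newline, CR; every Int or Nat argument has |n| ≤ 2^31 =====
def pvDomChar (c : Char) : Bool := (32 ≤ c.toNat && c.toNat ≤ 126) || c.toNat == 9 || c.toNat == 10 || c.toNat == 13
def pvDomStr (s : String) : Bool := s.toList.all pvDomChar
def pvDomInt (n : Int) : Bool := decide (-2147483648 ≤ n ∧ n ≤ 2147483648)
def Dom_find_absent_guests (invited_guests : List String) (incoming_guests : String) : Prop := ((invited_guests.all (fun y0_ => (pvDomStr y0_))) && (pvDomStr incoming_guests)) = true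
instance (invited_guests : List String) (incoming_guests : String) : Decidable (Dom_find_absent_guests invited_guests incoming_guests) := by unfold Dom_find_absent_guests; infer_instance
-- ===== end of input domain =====

-- B never calls sorted(): one set difference_update removes the non-END arrival lines, then each
-- remaining guest is placed at its sorted position in the VIP or regular list by a hand-written
-- online insertion sort (alternative algorithm, O(n^2) vs A's O(n log n) sorts). Both A and B
-- mutate the invited_guests set in place to the same final contents; the theorems are about the
-- return value.

-- shared helper: guest[0].isdigit() — exact on the ASCII domain; both Pythons contain this expression
def pyHeadIsDigit (g : String) : Bool :=
  match PySem.Str.pyGet? g 0 with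
  | some c => c.isDigit
  | none => false

-- ===== PORT A =====
def find_absent_guests (invited_guests : List String) (incoming_guests : String) : List String × List String :=
  let s0 : PySem.Set String := PySem.Set.ofList invited_guests
  let arrivals := (PySem.Str.split? incoming_guests "\n").getD []
  let s := arrivals.foldl (fun s g => if g ≠ "END" then PySem.Set.discard s g else s) s0
  (PySem.List.sorted (s.filter (fun g => pyHeadIsDigit g)) (fun x => x) false,
   PySem.List.sorted (s.filter (fun g => !pyHeadIsDigit g)) (fun x => x) false)

-- ===== PORT B =====
-- Source B's _insert_sorted: scan for the first position whose element is not < guest, insert there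
def insertSorted (lst : List String) (guest : String) : List String :=
  match lst with
  | [] => [guest]
  | x :: xs => if x < guest then x :: insertSorted xs guest else guest :: x :: xs

def find_absent_guests_alt (invited_guests : List String) (incoming_guests : String) : List String × List String :=
  let s0 : PySem.Set String := PySem.Set.ofList invited_guests
  -- difference_update(line for line in split if line != 'END'): discard each element of the iterable
  let toRemove := ((PySem.Str.split? incoming_guests "\n").getD []).filter (fun line => line ≠ "END")
  let s := toRemove.foldl (fun s g => PySem.Set.discard s g) s0
  s.foldl
    (fun acc g => if pyHeadIsDigit g then (insertSorted acc.1 g, acc.2)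
                  else (acc.1, insertSorted acc.2 g))
    (([] : List String), ([] : List String))

-- ===== PRECONDITION & SPEC =====
-- Pre_ excludes exactly the inputs on which A (and B) raises IndexError: an empty-string guest
-- that is still in the set after the removal step makes guest[0] raise.
def Pre_find_absent_guests (invited_guests : List String) (incoming_guests : String) : Prop :=
  "" ∈ invited_guests → "" ∈ (PySem.Str.split? incoming_guests "\n").getD []
instance (invited_guests : List String) (incoming_guests : String) : Decidable (Pre_find_absent_guests invited_guests incoming_guests) := by unfold Pre_find_absent_guests; infer_instance

def pvWitness_find_absent_guests : List String × String := (["7Heath", "Peter", "Maria"], "Peter\nEND")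

def Spec_find_absent_guests (invited_guests : List String) (incoming_guests : String) (out : List String × List String) : Prop := out = find_absent_guests_alt invited_guests incoming_guests
instance (invited_guests : List String) (incoming_guests : String) (out : List String × List String) : Decidable (Spec_find_absent_guests invited_guests incoming_guests out) := by unfold Spec_find_absent_guests; infer_instance

-- ===== CLAIM (what is proved, stated in full; the proofs are below) =====
def Claim_equal_find_absent_guests : Prop := ∀ (invited_guests : List String) (incoming_guests : String), Dom_find_absent_guests invited_guests incoming_guests → Pre_find_absent_guests invited_guests incoming_guests → Spec_find_absent_guests invited_guests incoming_guests (find_absent_guests invited_guests incoming_guests)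

-- ===== LEMMAS AND PROOFS =====

-- A's conditional discard loop removes exactly the same elements as B's fold over the filtered list
theorem foldl_discard_filter (l : List String) (s : PySem.Set String) :
    (l.filter (fun g => g ≠ "END")).foldl (fun s g => PySem.Set.discard s g) s
      = l.foldl (fun s g => if g ≠ "END" then PySem.Set.discard s g else s) s := by
  induction l generalizing s with
  | nil => rfl
  | cons g l ih =>
    by_cases hg : g = "END"
    · simpa [hg] using ih s
    · simpa [hg] using ih (PySem.Set.discard s g)

-- the discard loop preserves the no-duplicates invariant of a PySem.Set
theorem nodup_foldl_discard (l : List String) (s : PySem.Set String) (h : s.Nodup) :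
    (l.foldl (fun s g => if g ≠ "END" then PySem.Set.discard s g else s) s).Nodup := by
  induction l generalizing s with
  | nil => simpa
  | cons g l ih =>
    simp only [List.foldl_cons]
    by_cases hg : g = "END"
    · simp only [hg, ne_eq, not_true_eq_false, if_neg, not_false_eq_true]
      exact ih _ h
    · have : (g ≠ "END") = True := by simp [hg]
      simp only [this, if_true]
      exact ih _ (PySem.Set.nodup_discard s g h)

theorem insertSorted_perm (l : List String) (g : String) :
    (insertSorted l g).Perm (g :: l) := by
  induction l with
  | nil => simp [insertSorted]
  | cons x xs ih =>
    by_cases h : x < g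
    · simpa [insertSorted, h] using ((ih.cons x).trans (List.Perm.swap g x xs))
    · simp [insertSorted, h]

theorem insertSorted_pairwise (l : List String) (g : String)
    (h : l.Pairwise (· < ·)) (hg : g ∉ l) :
    (insertSorted l g).Pairwise (· < ·) := by
  induction l with
  | nil => simp [insertSorted]
  | cons x xs ih =>
    rcases List.pairwise_cons.mp h with ⟨hx, hxs⟩
    by_cases hlt : x < g
    · have htail := ih hxs (fun hm => hg (List.mem_cons_of_mem _ hm))
      have hres : (x :: insertSorted xs g).Pairwise (· < ·) := by
        refine List.pairwise_cons.mpr ⟨?_, htail⟩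
        intro y hy
        rcases List.mem_cons.mp ((insertSorted_perm xs g).mem_iff.mp hy) with rfl | hy
        · exact hlt
        · exact hx _ hy
      simpa [insertSorted, hlt] using hres
    · have hgx : g < x := by
        have hne : g ≠ x := fun e => hg (e ▸ List.mem_cons_self ..)
        exact lt_of_le_of_ne (le_of_not_gt hlt) hne
      have : (g :: x :: xs).Pairwise (· < ·) := by
        refine List.pairwise_cons.mpr ⟨?_, h⟩
        intro y hy
        rcases List.mem_cons.mp hy with rfl | hy
        · exact hgx
        · exact hgx.trans (hx _ hy)
      simpa [insertSorted, hlt] using this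

theorem foldl_insertSorted (l acc : List String) (hnd : l.Nodup)
    (hacc : acc.Pairwise (· < ·)) (hdisj : ∀ x ∈ l, x ∉ acc) :
    (l.foldl insertSorted acc).Pairwise (· < ·) ∧ (l.foldl insertSorted acc).Perm (acc ++ l) := by
  induction l generalizing acc with
  | nil => simpa using hacc
  | cons g xs ih =>
    have hgacc : g ∉ acc := hdisj g (List.mem_cons_self ..)
    have hacc' : (insertSorted acc g).Pairwise (· < ·) := insertSorted_pairwise acc g hacc hgacc
    have hdisj' : ∀ x ∈ xs, x ∉ insertSorted acc g := by
      intro x hx hmem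
      rcases List.mem_cons.mp ((insertSorted_perm acc g).mem_iff.mp hmem) with rfl | hmem
      · exact (List.nodup_cons.mp hnd).1 hx
      · exact hdisj x (List.mem_cons_of_mem _ hx) hmem
    obtain ⟨hp, hperm⟩ := ih (insertSorted acc g) (List.nodup_cons.mp hnd).2 hacc' hdisj'
    have h1 : (insertSorted acc g ++ xs).Perm (acc ++ g :: xs) :=
      ((insertSorted_perm acc g).append_right xs).trans List.perm_middle.symm
    exact ⟨by simpa using hp, by simpa using hperm.trans h1⟩

-- insertion sort of a duplicate-free list equals Python's sorted()
theorem foldl_insertSorted_eq_sorted (l : List String) (hnd : l.Nodup) :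
    l.foldl insertSorted [] = PySem.List.sorted l (fun x => x) false := by
  obtain ⟨hp, hperm⟩ := foldl_insertSorted l [] hnd (by simp) (by simp)
  have hperm' : (l.foldl insertSorted []).Perm l := by simpa using hperm
  have h := PySem.List.sorted_eq_of_perm_of_pairwise_lt l (l.foldl insertSorted []) (fun x => x) hperm' hp
  exact h.symm

-- B's single pass equals two independent insertion-sort folds over the filtered halves
theorem partition_fold (p : String → Bool) (l : List String) (acc : List String × List String) :
    l.foldl (fun acc g => if p g then (insertSorted acc.1 g, acc.2)
                          else (acc.1, insertSorted acc.2 g)) acc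
      = ((l.filter p).foldl insertSorted acc.1,
         (l.filter (fun g => !p g)).foldl insertSorted acc.2) := by
  induction l generalizing acc with
  | nil => rfl
  | cons g xs ih =>
    by_cases h : p g <;> simp [h, ih]

-- ===== VERDICT (by name: the statement is the Claim_ definition above) =====
theorem find_absent_guests_spec : Claim_equal_find_absent_guests := by
  intro inv inc _ _
  unfold Spec_find_absent_guests find_absent_guests find_absent_guests_alt
  dsimp only
  rw [foldl_discard_filter]
  set s := ((PySem.Str.split? inc "\n").getD []).foldl
      (fun s g => if g ≠ "END" then PySem.Set.discard s g else s)
      (PySem.Set.ofList inv) with hs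
  have hnd : s.Nodup := nodup_foldl_discard _ _ (PySem.Set.nodup_ofList inv)
  rw [partition_fold,
      foldl_insertSorted_eq_sorted _ (hnd.filter _),
      foldl_insertSorted_eq_sorted _ (hnd.filter _)]
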